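-- pv_equiv track=rewrite | github.com/mgs95/hackerrank | competitions/Week of Code 38 (gold medal)/2_MinuteToWinIt.py | minute_to_win_it
-- ===== SOURCE A (Python) =====
-- from collections import Counter
--
-- def minute_to_win_it(a, k):
--     # Return the minimum amount of time in minutes.
--     N = len(a)
--
--     factor = -k
--     for idx in range(N):
--         a[idx] += factor
--         factor -= k
--
--     results = Counter(a)
--     longest_subset = results.most_common(1)[0][1]
--
--     return N - longest_subset
-- ===== SOURCE B (Python) =====
-- def minute_to_win_it(a, k):
--     # Return the minimum amount of time in minutes.
--     factor = -k
--     for idx in range(len(a)):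
--         a[idx] += factor
--         factor -= k
--
--     best = 0
--     run = 0
--     prev = None
--     for v in sorted(a):
--         run = run + 1 if prev == v else 1
--         if run > best:
--             best = run
--         prev = v
--
--     return len(a) - best
-- ===== Notes on version B (the rewrite author's own statement) =====
-- stated objective: alternative
-- what changed: Replaces Counter + most_common with a sorted copy of the adjusted array and one linear scan tracking the longest run of equal consecutive values; the in-place adjustment loop is kept so the argument is mutated exactly as A does.
import Mathlib
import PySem

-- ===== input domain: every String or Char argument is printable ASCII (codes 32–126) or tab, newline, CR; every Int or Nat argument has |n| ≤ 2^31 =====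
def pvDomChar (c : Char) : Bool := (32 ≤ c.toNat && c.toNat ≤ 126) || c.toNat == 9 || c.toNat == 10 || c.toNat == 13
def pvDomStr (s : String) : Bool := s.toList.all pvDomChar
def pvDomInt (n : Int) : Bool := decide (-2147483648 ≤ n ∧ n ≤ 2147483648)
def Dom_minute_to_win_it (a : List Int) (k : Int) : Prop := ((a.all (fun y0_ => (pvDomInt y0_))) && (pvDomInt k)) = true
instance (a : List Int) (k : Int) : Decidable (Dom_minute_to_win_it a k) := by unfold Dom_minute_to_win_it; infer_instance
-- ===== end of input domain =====

-- B replaces Counter + most_common with a sorted copy and a longest-run scan; return-value equivalence (both Pythons mutate `a` in place identically).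


-- ===== PORT A =====
-- the in-place adjustment loop 'for idx in range(N): a[idx] += factor; factor -= k'
-- (identical, line for line, in A and in B, so ported once and used by both ports)
def pvAdjust (a : List Int) (k : Int) : List Int :=
  ((PySem.List.pyRange 0 (a.length : Int) 1).foldl
    (fun (st : List Int × Int) idx =>
      (PySem.List.pySetD st.1 idx (PySem.List.pyGetD st.1 idx 0 + st.2), st.2 - k))
    (a, -k)).1

def minute_to_win_it (a : List Int) (k : Int) : Int :=
  let N : Int := (a.length : Int)
  let l := pvAdjust a k
  -- results = Counter(a); results.most_common(1) = items sorted by count descending (stable), first 1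
  let mc := (PySem.List.sorted (PySem.Dict.counter l).items (fun p => p.2) true).take 1
  match PySem.List.pyGet? mc 0 with
  | some p => N - p.2
  | none => 0   -- IndexError in Python (empty a); excluded by Pre_

-- ===== PORT B =====
-- one step of B's scan over the sorted list: state = (best, run, prev)
def pvStep (st : Int × Int × Option Int) (v : Int) : Int × Int × Option Int :=
  let run := if st.2.2 == some v then st.2.1 + 1 else 1
  let best := if run > st.1 then run else st.1
  (best, run, some v)

def minute_to_win_it_alt (a : List Int) (k : Int) : Int :=
  let l := pvAdjust a k
  let st := (PySem.List.sorted l (fun x => x) false).foldl pvStep (0, 0, none)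
  (a.length : Int) - st.1

-- ===== PRECONDITION & SPEC =====
-- Pre_ excludes only the empty list, on which A raises IndexError (most_common(1)[0] on an empty Counter).
def Pre_minute_to_win_it (a : List Int) (k : Int) : Prop := a ≠ []
instance (a : List Int) (k : Int) : Decidable (Pre_minute_to_win_it a k) := by unfold Pre_minute_to_win_it; infer_instance
def pvWitness_minute_to_win_it : List Int × Int := ([3, 1, 3], 2)

def Spec_minute_to_win_it (a : List Int) (k : Int) (out : Int) : Prop := out = minute_to_win_it_alt a k
instance (a : List Int) (k : Int) (out : Int) : Decidable (Spec_minute_to_win_it a k out) := by unfold Spec_minute_to_win_it; infer_instance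

-- ===== CLAIM (what is proved, stated in full; the proofs are below) =====
def Claim_equal_minute_to_win_it : Prop := ∀ (a : List Int) (k : Int), Dom_minute_to_win_it a k → Pre_minute_to_win_it a k → Spec_minute_to_win_it a k (minute_to_win_it a k)

-- ===== LEMMAS AND PROOFS =====

lemma pvAdjust_foldl_length (k : Int) (idxs : List Int) : ∀ st : List Int × Int,
    ((idxs.foldl (fun (st : List Int × Int) idx =>
      (PySem.List.pySetD st.1 idx (PySem.List.pyGetD st.1 idx 0 + st.2), st.2 - k)) st).1).length
      = st.1.length := by
  induction idxs with
  | nil => intro st; rfl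
  | cons i t ih =>
    intro st
    rw [List.foldl_cons, ih]
    exact PySem.List.length_pySetD _ _ _

lemma pvAdjust_length (a : List Int) (k : Int) : (pvAdjust a k).length = a.length :=
  pvAdjust_foldl_length k _ (a, -k)

lemma pv_scan_spec (s : List Int) (hs : s.Pairwise (· ≤ ·)) (hne : s ≠ []) :
    ∃ b r v, s.foldl pvStep (0, 0, none) = (b, r, some v) ∧ v ∈ s ∧
      (∀ x ∈ s, x ≤ v) ∧ r = (s.count v : Int) ∧
      (∃ x ∈ s, b = (s.count x : Int)) ∧ (∀ x ∈ s, (s.count x : Int) ≤ b) := by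
  induction s using List.reverseRecOn with
  | nil => exact absurd rfl hne
  | append_singleton p w ih =>
    rw [List.pairwise_append] at hs
    obtain ⟨hp, -, hcross⟩ := hs
    have hcross' : ∀ x ∈ p, x ≤ w := fun x hx => hcross x hx w (by simp)
    rw [List.foldl_append]
    by_cases hpe : p = []
    · subst hpe
      refine ⟨1, 1, w, by simp [pvStep], by simp, by simp, by simp, ⟨w, by simp, by simp⟩, by simp⟩
    · obtain ⟨b, r, v, hfold, hv, hle, hr, ⟨x, hx, hb⟩, hbd⟩ := ih hp hpe
      rw [hfold]
      have hbr : r ≤ b := hr ▸ hbd v hv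
      by_cases hvw : v = w
      · subst hvw
        have hcw : ((p ++ [v]).count v : Int) = (p.count v : Int) + 1 := by
          simp [List.count_append]
        have hcx : ∀ y : Int, y ≠ v → (p ++ [v]).count y = p.count y := by
          intro y hy
          simp [List.count_append, Ne.symm hy]
        have hstep : pvStep (b, r, some v) v = (if r + 1 > b then r + 1 else b, r + 1, some v) := by
          simp [pvStep]
        refine ⟨_, r + 1, v, hstep, by simp, ?_, ?_, ?_, ?_⟩
        · intro y hy
          rcases List.mem_append.1 hy with h | h
          · exact hle y h
          · simp at h; omega
        · rw [hcw]; omega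
        · by_cases hgt : r + 1 > b
          · exact ⟨v, by simp, by rw [if_pos hgt, hcw]; omega⟩
          · have hxw : x ≠ v := by
              intro hxe; subst hxe; omega
            exact ⟨x, List.mem_append_left _ hx, by rw [if_neg hgt, hcx x hxw]; exact hb⟩
        · intro y hy
          by_cases hyw : y = v
          · subst hyw; rw [hcw]; split <;> omega
          · have : y ∈ p := by
              rcases List.mem_append.1 hy with h | h
              · exact h
              · simp at h; exact absurd h hyw
            rw [hcx y hyw]
            have := hbd y this
            split <;> omega
      · have hwp : w ∉ p := by
          intro hwp
          exact hvw (le_antisymm (hcross' v hv) (hle w hwp))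
        have hb1 : (1 : Int) ≤ b := by
          have : 0 < p.count v := List.count_pos_iff.2 hv
          omega
        have hstep : pvStep (b, r, some v) w = (b, 1, some w) := by
          simp [pvStep, hvw]
          omega
        have hcx : ∀ y : Int, y ≠ w → (p ++ [w]).count y = p.count y := by
          intro y hy
          simp [List.count_append, Ne.symm hy]
        have hcw : (p ++ [w]).count w = 1 := by
          simp [List.count_append, List.count_eq_zero_of_not_mem hwp]
        refine ⟨b, 1, w, hstep, by simp, ?_, by rw [hcw]; simp, ?_, ?_⟩
        · intro y hy
          rcases List.mem_append.1 hy with h | h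
          · exact hcross' y h
          · simp at h; omega
        · have hxw : x ≠ w := fun he => hwp (he ▸ hx)
          exact ⟨x, List.mem_append_left _ hx, by rw [hcx x hxw]; exact hb⟩
        · intro y hy
          by_cases hyw : y = w
          · subst hyw; rw [hcw]; omega
          · have hyp : y ∈ p := by
              rcases List.mem_append.1 hy with h | h
              · exact h
              · simp at h; exact absurd h hyw
            rw [hcx y hyw]; exact hbd y hyp

lemma pv_head_spec (l : List Int) (hl : l ≠ []) :
    ∃ h t, PySem.List.sorted (PySem.Dict.counter l).items (fun p => p.2) true = h :: t ∧
      (∃ e ∈ l, h.2 = (l.count e : Int)) ∧ (∀ x ∈ l, (l.count x : Int) ≤ h.2) := by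
  have hitems : (PySem.Dict.counter l).items
      = (PySem.Set.ofList l).map (fun k => (k, (l.count k : Int))) := PySem.Dict.items_counter l
  have hne : (PySem.Dict.counter l).items ≠ [] := by
    rw [hitems]
    obtain ⟨z, zs, rfl⟩ := List.exists_cons_of_ne_nil hl
    have : z ∈ PySem.Set.ofList (z :: zs) := (PySem.Set.mem_ofList _ _).2 (by simp)
    intro hmap
    simp only [List.map_eq_nil_iff] at hmap
    rw [hmap] at this
    simp at this
  have hsne : PySem.List.sorted (PySem.Dict.counter l).items (fun p => p.2) true ≠ [] := by
    intro h
    exact hne ((PySem.List.sorted_eq_nil_iff _ _ _).1 h)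
  obtain ⟨h, t, heq⟩ := List.exists_cons_of_ne_nil hsne
  refine ⟨h, t, heq, ?_, ?_⟩
  · have hmem : h ∈ (PySem.Dict.counter l).items := by
      have : h ∈ PySem.List.sorted (PySem.Dict.counter l).items (fun p => p.2) true := by
        rw [heq]; simp
      exact (PySem.List.mem_sorted _ _ _ _).1 this
    rw [hitems] at hmem
    obtain ⟨e, he, rfl⟩ := List.mem_map.1 hmem
    exact ⟨e, (PySem.Set.mem_ofList _ _).1 he, rfl⟩
  · intro x hx
    have hmem : (x, (l.count x : Int)) ∈ (PySem.Dict.counter l).items := by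
      rw [hitems]
      exact List.mem_map.2 ⟨x, (PySem.Set.mem_ofList _ _).2 hx, rfl⟩
    exact PySem.List.key_head_sorted_rev_ge _ (fun p => p.2) heq _ hmem

-- ===== VERDICT (by name: the statement is the Claim_ definition above) =====
theorem minute_to_win_it_spec : Claim_equal_minute_to_win_it := by
  intro a k _ hpre
  show minute_to_win_it a k = minute_to_win_it_alt a k
  have hlne : pvAdjust a k ≠ [] := by
    intro h
    apply hpre
    have hL := pvAdjust_length a k
    rw [h] at hL
    exact List.length_eq_zero_iff.1 hL.symm
  obtain ⟨h, t, heq, ⟨e, he, he2⟩, hbdA⟩ := pv_head_spec (pvAdjust a k) hlne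
  have hs := PySem.List.sorted_pairwise (pvAdjust a k) (fun x => x)
  have hsne : PySem.List.sorted (pvAdjust a k) (fun x => x) false ≠ [] := by
    intro hh
    exact hlne ((PySem.List.sorted_eq_nil_iff _ _ _).1 hh)
  obtain ⟨b, r, v, hfold, hv, -, -, ⟨x, hx, hb⟩, hbdB⟩ := pv_scan_spec _ hs hsne
  have hcnt : ∀ y, (PySem.List.sorted (pvAdjust a k) (fun x => x) false).count y
      = (pvAdjust a k).count y :=
    fun y => (PySem.List.sorted_perm _ _ _).count_eq y
  have hxl : x ∈ pvAdjust a k := (PySem.List.mem_sorted _ _ _ _).1 hx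
  have h1 : b ≤ h.2 := by
    rw [hb, hcnt x]
    exact hbdA x hxl
  have h2 : h.2 ≤ b := by
    rw [he2, ← hcnt e]
    exact hbdB e ((PySem.List.mem_sorted _ _ _ _).2 he)
  have hhb : h.2 = b := le_antisymm h2 h1
  simp only [minute_to_win_it, minute_to_win_it_alt]
  rw [heq, hfold]
  simp [PySem.List.pyGet?, PySem.List.pyIdx?, hhb]
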